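-- pv_equiv track=rewrite | github.com/zhangtrex/2017A2CS | ch25/recursion2.py | groupSum6
-- ===== SOURCE A (Python) =====
-- def groupSum6(s,n,t):
--     if t == 0 and s == len(n):
--         return True
--     elif t != 0 and s == len(n):
--         return False
--     if n[s] == 6:
--         return groupSum6(s+1,n,t-n[s])
--     elif t == 0 and s != len(n):
--         return groupSum6(s+1,n,t)
--     else:
--         return groupSum6(s+1,n,t-n[s]) or groupSum6(s+1,n,t)
-- ===== SOURCE B (Python) =====
-- def groupSum6(s, n, t):
--     # Forward DP over the set of reachable remaining targets (memoization on targets),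
--     # walking the same Python index range the recursion would.
--     targets = {t}
--     for i in range(s, len(n)):
--         x = n[i]
--         if x == 6:
--             targets = {v - 6 for v in targets}
--         else:
--             targets |= {v - x for v in targets if v != 0}
--     return 0 in targets
-- ===== Notes on version B (the rewrite author's own statement) =====
-- stated objective: alternative
-- what changed: Replaced the branching recursion by a single forward pass over the index range that maintains the set of reachable remaining targets, checking 0-membership at the end.
import Mathlib
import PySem

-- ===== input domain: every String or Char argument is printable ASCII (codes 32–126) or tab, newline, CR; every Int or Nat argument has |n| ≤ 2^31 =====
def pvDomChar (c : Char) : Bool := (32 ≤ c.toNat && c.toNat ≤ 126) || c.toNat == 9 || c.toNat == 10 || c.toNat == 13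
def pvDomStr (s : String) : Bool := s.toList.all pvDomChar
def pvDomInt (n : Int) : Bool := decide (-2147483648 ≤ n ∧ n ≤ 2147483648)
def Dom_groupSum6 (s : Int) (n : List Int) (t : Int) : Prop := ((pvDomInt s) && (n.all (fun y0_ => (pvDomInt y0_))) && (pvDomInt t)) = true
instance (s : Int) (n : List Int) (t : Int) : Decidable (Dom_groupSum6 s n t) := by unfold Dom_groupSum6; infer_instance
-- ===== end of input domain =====

-- B replaces A's branching recursion by one forward pass over the index range
-- maintaining the set of reachable remaining targets (a different algorithm;
-- not claimed faster).


-- ===== PORT A =====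
-- fuel only makes the recursion total; with -n.length ≤ s ≤ n.length it never runs out
def groupSum6Go : Nat → Int → List Int → Int → Bool
  | 0, _, _, _ => false
  | fuel+1, s, n, t =>
    if t == 0 && s == (n.length : Int) then true
    else if t != 0 && s == (n.length : Int) then false
    else
      match PySem.List.pyGet? n s with
      | none => false   -- IndexError (outside Pre_)
      | some x =>
        if x == 6 then groupSum6Go fuel (s+1) n (t - x)
        else if t == 0 && s != (n.length : Int) then groupSum6Go fuel (s+1) n t
        else groupSum6Go fuel (s+1) n (t - x) || groupSum6Go fuel (s+1) n t

def groupSum6 (s : Int) (n : List Int) (t : Int) : Bool :=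
  groupSum6Go (2 * n.length + 1) s n t

-- ===== PORT B =====
-- loop body of Source B, given x = n[i] (iteration order over the Python set is
-- irrelevant: only membership of the resulting sets is ever consumed)
def groupSum6Step (targets : PySem.Set Int) (x : Int) : PySem.Set Int :=
  if x == 6 then PySem.Set.ofList (targets.map (fun v => v - 6))
  else PySem.Set.update targets ((targets.filter (fun v => v != 0)).map (fun v => v - x))

def groupSum6_alt (s : Int) (n : List Int) (t : Int) : Bool :=
  let targets := (PySem.List.pyRange s (n.length : Int) 1).foldl
    (fun targets i => groupSum6Step targets (PySem.List.pyGetD n i 0))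
    (PySem.Set.ofList [t])
  targets.contains 0

-- ===== PRECONDITION & SPEC =====
-- Pre_ excludes exactly the starts where A raises IndexError (s > len(n), where the
-- base-case test is passed, and s < -len(n), where n[s] is out of range).
def Pre_groupSum6 (s : Int) (n : List Int) (t : Int) : Prop :=
  -(n.length : Int) ≤ s ∧ s ≤ (n.length : Int)
instance (s : Int) (n : List Int) (t : Int) : Decidable (Pre_groupSum6 s n t) := by unfold Pre_groupSum6; infer_instance
def pvWitness_groupSum6 : Int × List Int × Int := (0, [2, 6, 4], 10)

def Spec_groupSum6 (s : Int) (n : List Int) (t : Int) (out : Bool) : Prop := out = groupSum6_alt s n t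
instance (s : Int) (n : List Int) (t : Int) (out : Bool) : Decidable (Spec_groupSum6 s n t out) := by unfold Spec_groupSum6; infer_instance

-- ===== CLAIM (what is proved, stated in full; the proofs are below) =====
def Claim_equal_groupSum6 : Prop := ∀ (s : Int) (n : List Int) (t : Int), Dom_groupSum6 s n t → Pre_groupSum6 s n t → Spec_groupSum6 s n t (groupSum6 s n t)

-- ===== LEMMAS AND PROOFS =====

-- the elements A's recursion (and B's loop) reads, in order: n[i] for i in range(s, len(n))
def gsElems (s : Int) (n : List Int) : List Int :=
  (PySem.List.pyRange s (n.length : Int) 1).map (fun i => PySem.List.pyGetD n i 0)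

-- characterisation of A's recursion on that element sequence
def gsReach : List Int → Int → Bool
  | [], t => t == 0
  | x :: l, t =>
    if x == 6 then gsReach l (t - x)
    else if t == 0 then gsReach l t
    else gsReach l (t - x) || gsReach l t

theorem gsElems_nil (n : List Int) : gsElems (n.length : Int) n = [] := by
  simp [gsElems, PySem.List.pyRange_one_eq_nil le_rfl]

theorem gsElems_cons (s : Int) (n : List Int) (h : s < (n.length : Int)) :
    gsElems s n = PySem.List.pyGetD n s 0 :: gsElems (s + 1) n := by
  rw [gsElems, PySem.List.pyRange_one_cons h, List.map_cons]; rfl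

theorem gsGo_eq_reach (n : List Int) : ∀ (fuel : Nat) (s t : Int),
    -(n.length : Int) ≤ s → s ≤ (n.length : Int) → ((n.length : Int) - s).toNat < fuel →
    groupSum6Go fuel s n t = gsReach (gsElems s n) t := by
  intro fuel
  induction fuel with
  | zero => intro s t h0 h1 h2; omega
  | succ f ih =>
    intro s t h0 h1 h2
    by_cases hs : s = (n.length : Int)
    · subst hs
      by_cases ht : t = 0 <;>
        simp [groupSum6Go, gsElems_nil, gsReach, ht]
    · have hlt : s < (n.length : Int) := lt_of_le_of_ne h1 hs
      obtain ⟨x, hx⟩ : ∃ x, PySem.List.pyGet? n s = some x := by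
        cases hget : PySem.List.pyGet? n s with
        | none =>
          rw [PySem.List.pyGet?_eq_none_iff] at hget
          exact absurd ⟨h0, hlt⟩ hget
        | some x => exact ⟨x, rfl⟩
      have hxd : PySem.List.pyGetD n s 0 = x := by
        simp [PySem.List.pyGetD, hx]
      have hdrop : gsElems s n = x :: gsElems (s + 1) n := by
        rw [gsElems_cons s n hlt, hxd]
      have ih1 : groupSum6Go f (s + 1) n (t - x) = gsReach (gsElems (s + 1) n) (t - x) :=
        ih (s + 1) (t - x) (by omega) (by omega) (by omega)
      have ih2 : groupSum6Go f (s + 1) n t = gsReach (gsElems (s + 1) n) t :=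
        ih (s + 1) t (by omega) (by omega) (by omega)
      rw [groupSum6Go, hx, hdrop]
      by_cases hxv : x = (6 : Int) <;> by_cases ht : t = 0
      · subst ht; simp only [hxv] at ih1; norm_num at ih1
        simp [gsReach, hs, hxv, ih1]
      · simp only [hxv] at ih1
        simp [gsReach, hs, hxv, ht, ih1]
      · subst ht
        simp [gsReach, hs, hxv, ih2]
      · simp [gsReach, hs, hxv, ht, ih1, ih2]

theorem gsFold_contains (l : List Int) : ∀ S : PySem.Set Int,
    ((l.foldl groupSum6Step S).contains 0 = true ↔ ∃ v ∈ S, gsReach l v = true) := by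
  induction l with
  | nil =>
    intro S
    simp [gsReach]
  | cons x l ih =>
    intro S
    rw [List.foldl_cons, ih]
    constructor
    · rintro ⟨v, hv, hr⟩
      by_cases hx : x = (6 : Int)
      · simp only [groupSum6Step, hx, beq_self_eq_true, if_true, PySem.Set.mem_ofList,
          List.mem_map] at hv
        obtain ⟨w, hw, rfl⟩ := hv
        exact ⟨w, hw, by simp [gsReach, hx, hr]⟩
      · simp only [groupSum6Step, beq_iff_eq, hx, if_false, PySem.Set.mem_update,
          List.mem_map, List.mem_filter] at hv
        rcases hv with hv | ⟨w, ⟨hw, hw0⟩, rfl⟩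
        · refine ⟨v, hv, ?_⟩
          by_cases hv0 : v = 0
          · subst hv0; simp [gsReach, hx, hr]
          · simp [gsReach, hx, hv0, hr]
        · have hw0' : w ≠ 0 := by simpa using hw0
          exact ⟨w, hw, by simp [gsReach, hx, hw0', hr]⟩
    · rintro ⟨v, hv, hr⟩
      by_cases hx : x = (6 : Int)
      · subst hx
        simp only [gsReach, beq_self_eq_true, if_true] at hr
        refine ⟨v - 6, ?_, hr⟩
        simp only [groupSum6Step, beq_self_eq_true, if_true, PySem.Set.mem_ofList,
          List.mem_map]
        exact ⟨v, hv, rfl⟩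
      · by_cases hv0 : v = 0
        · subst hv0
          simp only [gsReach, beq_iff_eq, hx, if_false, if_true] at hr
          refine ⟨0, ?_, hr⟩
          simp [groupSum6Step, hx, PySem.Set.mem_update, hv]
        · simp only [gsReach, beq_iff_eq, hx, hv0, if_false, Bool.or_eq_true] at hr
          rcases hr with hr | hr
          · refine ⟨v - x, ?_, hr⟩
            simp only [groupSum6Step, beq_iff_eq, hx, if_false, PySem.Set.mem_update,
              List.mem_map, List.mem_filter]
            exact Or.inr ⟨v, ⟨hv, by simpa using hv0⟩, rfl⟩
          · refine ⟨v, ?_, hr⟩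
            simp [groupSum6Step, hx, PySem.Set.mem_update, hv]

theorem gsAlt_eq (s : Int) (n : List Int) (t : Int) :
    groupSum6_alt s n t = ((gsElems s n).foldl groupSum6Step (PySem.Set.ofList [t])).contains 0 := by
  rw [groupSum6_alt, gsElems, List.foldl_map]

-- ===== VERDICT (by name: the statement is the Claim_ definition above) =====
theorem groupSum6_spec : Claim_equal_groupSum6 := by
  intro s n t _ hpre
  obtain ⟨h0, h1⟩ := hpre
  unfold Spec_groupSum6
  have hA : groupSum6 s n t = gsReach (gsElems s n) t := by
    rw [groupSum6]
    exact gsGo_eq_reach n (2 * n.length + 1) s t h0 h1 (by omega)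
  have hB := gsFold_contains (gsElems s n) (PySem.Set.ofList [t])
  simp only [PySem.Set.mem_ofList, List.mem_singleton] at hB
  rw [hA, gsAlt_eq]
  cases hr : gsReach (gsElems s n) t
  · rw [eq_comm, ← Bool.not_eq_true]
    intro hc
    obtain ⟨v, rfl, hv⟩ := hB.mp hc
    simp [hr] at hv
  · exact (hB.mpr ⟨t, rfl, hr⟩).symm
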